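-- pv_equiv track=rewrite | github.com/rubienr/network-monitoring | data_vis/views.py | mergeDictionariesToChartData
-- ===== SOURCE A (Python) =====
-- from collections import OrderedDict
--
-- def mergeDictionariesToChartData(dictList = []):
--     def uniq(lst):
--         last = object()
--         for item in lst:
--             if item == last:
--                 continue
--             yield item
--             last = item
--
--     def sort_and_deduplicate(l):
--         return list(uniq(sorted(l, reverse=True)))
--
--     # sort the key set of all dicts
--     xValues = []
--     for d in dictList:
--         xValues.extend(d.keys())
--     xValues = sort_and_deduplicate(xValues)
--
--     # create result dicts
--     idx = 1
--     chartDicts = {}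
--     for d in dictList:
--         chartDicts["y%s" % idx] = OrderedDict()
--         idx += 1
--
--     # for all keys and all dicts in dictList store value or default (0) to result
--     idx = 1
--     for d in dictList:
--         for x in xValues:
--             if x in d.keys():
--                 chartDicts["y%s" % idx][x] = d[x]
--             else:
--                 chartDicts["y%s" % idx][x] = 0
--         idx += 1
--
--     return xValues, chartDicts
-- ===== SOURCE B (Python) =====
-- from collections import OrderedDict
--
-- def mergeDictionariesToChartData(dictList = []):
--     xValues = sorted({k for d in dictList for k in d}, reverse=True)
--     chartDicts = {
--         "y%d" % i: OrderedDict((x, d.get(x, 0)) for x in xValues)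
--         for i, d in enumerate(dictList, 1)
--     }
--     return xValues, chartDicts
-- ===== Notes on version B (the rewrite author's own statement) =====
-- stated objective: simpler
-- what changed: B deduplicates keys with a set passed to sorted(reverse=True) instead of A's sort-then-adjacent-dedup generator, and builds the whole result in one enumerate comprehension with d.get(x, 0) instead of A's two separate loops (empty-dict creation, then membership-tested fill).
import Mathlib
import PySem

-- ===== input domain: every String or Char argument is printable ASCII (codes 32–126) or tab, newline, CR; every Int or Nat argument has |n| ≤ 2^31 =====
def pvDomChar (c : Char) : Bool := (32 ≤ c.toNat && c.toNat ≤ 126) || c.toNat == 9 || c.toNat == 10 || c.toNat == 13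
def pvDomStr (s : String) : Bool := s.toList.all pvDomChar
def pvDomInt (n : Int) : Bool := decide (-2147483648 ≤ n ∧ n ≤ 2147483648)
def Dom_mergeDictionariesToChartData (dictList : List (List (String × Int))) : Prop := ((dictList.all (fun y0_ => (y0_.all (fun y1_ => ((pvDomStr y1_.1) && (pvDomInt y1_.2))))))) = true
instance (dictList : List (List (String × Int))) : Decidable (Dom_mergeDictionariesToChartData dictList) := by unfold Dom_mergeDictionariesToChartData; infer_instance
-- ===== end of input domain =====

-- B replaces A's sort-then-adjacent-dedup generator by set-based dedup and fuses A's two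
-- separate result-building loops into one enumerate pass using d.get(x, 0); objective: simpler.

-- ===== PORT A =====

-- the `uniq` generator: adjacent deduplication ('last' updates on every yielded item)
def pyUniqFrom (last : String) : List String → List String
  | [] => []
  | x :: xs => if x = last then pyUniqFrom last xs else x :: pyUniqFrom x xs

def pyUniq : List String → List String
  | [] => []
  | x :: xs => x :: pyUniqFrom x xs

def mergeDictionariesToChartData (dictList : List (List (String × Int))) :
    List String × (List (String × List (String × Int))) :=
  -- xValues = []; for d in dictList: xValues.extend(d.keys())
  let xs0 : List String := dictList.foldl (fun acc d => acc ++ (PySem.Dict.ofList d).keys) []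
  -- sort_and_deduplicate = list(uniq(sorted(l, reverse=True)))
  let xValues : List String := pyUniq (PySem.List.sorted xs0 (fun s => s) true)
  -- idx = 1; for d in dictList: chartDicts["y%s" % idx] = OrderedDict(); idx += 1
  let init := dictList.foldl
      (fun (st : Int × PySem.Dict String (PySem.Dict String Int)) _ =>
        (st.1 + 1, st.2.insert ("y" ++ PySem.Int.toStr st.1) PySem.Dict.empty))
      (1, PySem.Dict.empty)
  -- idx = 1; for d in dictList: for x in xValues:
  --   chartDicts["y%s" % idx][x] = d[x] if x in d.keys() else 0
  let fin := dictList.foldl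
      (fun (st : Int × PySem.Dict String (PySem.Dict String Int)) d =>
        (st.1 + 1,
         xValues.foldl
           (fun C x =>
             C.modify ("y" ++ PySem.Int.toStr st.1) PySem.Dict.empty
               (fun inner => inner.insert x
                 (if (PySem.Dict.ofList d).contains x then (PySem.Dict.ofList d).getD x 0 else 0)))
           st.2))
      (1, init.2)
  (xValues, fin.2.items.map (fun p => (p.1, p.2.items)))

-- ===== PORT B =====
def mergeDictionariesToChartData_alt (dictList : List (List (String × Int))) :
    List String × (List (String × List (String × Int))) :=
  -- xValues = sorted({k for d in dictList for k in d}, reverse=True)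
  let xValues : List String :=
    PySem.List.sorted
      (PySem.Set.ofList (dictList.flatMap (fun d => (PySem.Dict.ofList d).keys)))
      (fun s => s) true
  -- {"y%d" % i: OrderedDict((x, d.get(x, 0)) for x in xValues) for i, d in enumerate(dictList, 1)}
  (xValues,
   (PySem.List.enumerate dictList 1).map
     (fun p =>
       ("y" ++ PySem.Int.toStr p.1,
        xValues.map (fun x => (x, (PySem.Dict.ofList p.2).getD x 0)))))

-- ===== PRECONDITION & SPEC =====
def Spec_mergeDictionariesToChartData (dictList : List (List (String × Int))) (out : List String × (List (String × List (String × Int)))) : Prop := out = mergeDictionariesToChartData_alt dictList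
instance (dictList : List (List (String × Int))) (out : List String × (List (String × List (String × Int)))) : Decidable (Spec_mergeDictionariesToChartData dictList out) := by unfold Spec_mergeDictionariesToChartData; infer_instance

-- ===== CLAIM (what is proved, stated in full; the proofs are below) =====
def Claim_equal_mergeDictionariesToChartData : Prop := ∀ (dictList : List (List (String × Int))), Dom_mergeDictionariesToChartData dictList → Spec_mergeDictionariesToChartData dictList (mergeDictionariesToChartData dictList)

-- ===== LEMMAS AND PROOFS =====

-- decimal value of a digit list: a left inverse of Nat.toDigits 10
def pvVal10 (cs : List Char) : Nat := cs.foldl (fun a c => 10 * a + (c.toNat - 48)) 0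

theorem pvToDigitsCore_shift (f : Nat) : ∀ (n : Nat) (ds : List Char),
    Nat.toDigitsCore 10 f n ds = Nat.toDigitsCore 10 f n [] ++ ds := by
  induction f with
  | zero => intro n ds; simp [Nat.toDigitsCore]
  | succ f ih =>
    intro n ds
    simp only [Nat.toDigitsCore]
    by_cases h : n / 10 = 0
    · simp [h]
    · simp only [h, if_false]
      rw [ih (n / 10) (Nat.digitChar (n % 10) :: ds), ih (n / 10) [Nat.digitChar (n % 10)]]
      simp

theorem pvVal10_append_digit (cs : List Char) (c : Char) :
    pvVal10 (cs ++ [c]) = 10 * pvVal10 cs + (c.toNat - 48) := by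
  simp [pvVal10, List.foldl_append]

theorem pvDigitChar_val (n : Nat) : (Nat.digitChar (n % 10)).toNat - 48 = n % 10 := by
  have h10 : n % 10 < 10 := Nat.mod_lt _ (by norm_num)
  set d := n % 10 with hd
  interval_cases d <;> decide

theorem pvVal10_toDigitsCore (f : Nat) : ∀ n : Nat, n < f →
    pvVal10 (Nat.toDigitsCore 10 f n []) = n := by
  induction f with
  | zero => intro n h; omega
  | succ f ih =>
    intro n h
    simp only [Nat.toDigitsCore]
    by_cases h0 : n / 10 = 0
    · have hn : n < 10 := by omega
      simp only [h0, if_true]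
      have hdc := pvDigitChar_val n
      simp only [pvVal10, List.foldl]
      omega
    · simp only [h0, if_false]
      rw [pvToDigitsCore_shift, pvVal10_append_digit]
      have hlt : n / 10 < f := by omega
      rw [ih _ hlt, pvDigitChar_val n]
      omega

theorem pvToDigits_inj {m n : Nat} (h : Nat.toDigits 10 m = Nat.toDigits 10 n) : m = n := by
  have hm := pvVal10_toDigitsCore (m + 1) m (by omega)
  have hn := pvVal10_toDigitsCore (n + 1) n (by omega)
  unfold Nat.toDigits at h
  rw [← hm, ← hn, h]

-- the label "y%s" % i
def pvLabel (i : Int) : String := "y" ++ PySem.Int.toStr i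

theorem pvLabel_inj {i j : Int} (hi : 0 ≤ i) (hj : 0 ≤ j) (h : pvLabel i = pvLabel j) : i = j := by
  have h2 : ("y" ++ PySem.Int.toStr i).toList = ("y" ++ PySem.Int.toStr j).toList := by
    unfold pvLabel at h; rw [h]
  simp only [String.toList_append, PySem.Int.toList_toStr] at h2
  have h3 : PySem.Int.toChars i = PySem.Int.toChars j := by simpa using h2
  unfold PySem.Int.toChars at h3
  rw [if_neg (by omega), if_neg (by omega)] at h3
  have := pvToDigits_inj h3
  omega

-- ---- xValues: adjacent dedup of a descending sort = reverse-sorted set ----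

theorem pvUniqFrom_spec (xs : List String) : ∀ last : String,
    List.Pairwise (fun a b => b ≤ a) (last :: xs) →
    ((∀ y ∈ pyUniqFrom last xs, y < last) ∧
      List.Pairwise (fun a b => b < a) (pyUniqFrom last xs) ∧
      (∀ y, y ∈ pyUniqFrom last xs ↔ (y ∈ xs ∧ y ≠ last))) := by
  induction xs with
  | nil => intro last _; simp [pyUniqFrom]
  | cons x xs ih =>
    intro last h
    rw [List.pairwise_cons] at h
    obtain ⟨hlast, hx⟩ := h
    have hxle : x ≤ last := hlast x (by simp)
    by_cases hxeq : x = last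
    · subst hxeq
      have hrec := ih x (by
        rw [List.pairwise_cons]
        exact ⟨fun y hy => hlast y (List.mem_cons_of_mem _ hy), (List.pairwise_cons.mp hx).2⟩)
      obtain ⟨h1, h2, h3⟩ := hrec
      refine ⟨by simpa [pyUniqFrom] using h1, by simpa [pyUniqFrom] using h2, ?_⟩
      intro y
      simp only [pyUniqFrom, if_true]
      rw [h3 y]
      constructor
      · rintro ⟨hy, hne⟩; exact ⟨List.mem_cons_of_mem _ hy, hne⟩
      · rintro ⟨hy, hne⟩
        rcases List.mem_cons.mp hy with h | h
        · exact absurd h hne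
        · exact ⟨h, hne⟩
    · have hxlt : x < last := lt_of_le_of_ne hxle hxeq
      obtain ⟨h1, h2, h3⟩ := ih x hx
      have hxsle : ∀ y ∈ xs, y ≤ x := fun y hy => (List.pairwise_cons.mp hx).1 y hy
      refine ⟨?_, ?_, ?_⟩
      · intro y hy
        simp only [pyUniqFrom, if_neg hxeq] at hy
        rcases List.mem_cons.mp hy with h | h
        · exact h ▸ hxlt
        · exact lt_trans (h1 y h) hxlt
      · simp only [pyUniqFrom, if_neg hxeq]
        rw [List.pairwise_cons]
        exact ⟨h1, h2⟩
      · intro y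
        simp only [pyUniqFrom, if_neg hxeq, List.mem_cons]
        rw [h3 y]
        constructor
        · rintro (rfl | ⟨hy, hne⟩)
          · exact ⟨Or.inl rfl, hxeq⟩
          · exact ⟨Or.inr hy, ne_of_lt (lt_of_le_of_lt (hxsle y hy) hxlt)⟩
        · rintro ⟨rfl | hy, hne⟩
          · exact Or.inl rfl
          · by_cases hyx : y = x
            · exact Or.inl hyx
            · exact Or.inr ⟨hy, hyx⟩

theorem pvUniq_pairwise (xs : List String) (h : List.Pairwise (fun a b => b ≤ a) xs) :
    List.Pairwise (fun a b => b < a) (pyUniq xs) := by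
  cases xs with
  | nil => simp [pyUniq]
  | cons x xs =>
    obtain ⟨h1, h2, _⟩ := pvUniqFrom_spec xs x h
    simp only [pyUniq]
    rw [List.pairwise_cons]
    exact ⟨h1, h2⟩

theorem pvMem_pvUniq (xs : List String) (h : List.Pairwise (fun a b => b ≤ a) xs) (y : String) :
    y ∈ pyUniq xs ↔ y ∈ xs := by
  cases xs with
  | nil => simp [pyUniq]
  | cons x xs =>
    obtain ⟨_, _, h3⟩ := pvUniqFrom_spec xs x h
    simp only [pyUniq, List.mem_cons]
    rw [h3 y]
    constructor
    · rintro (rfl | ⟨hy, _⟩)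
      · exact Or.inl rfl
      · exact Or.inr hy
    · rintro (rfl | hy)
      · exact Or.inl rfl
      · by_cases hyx : y = x
        · exact Or.inl hyx
        · exact Or.inr ⟨hy, hyx⟩

theorem pvSorted_rev_pairwise (L : List String) :
    List.Pairwise (fun a b : String => b ≤ a) (PySem.List.sorted L (fun s => s) true) := by
  simpa using PySem.List.sorted_pairwise_rev L (fun s => s)

-- B's xValues equals A's xValues
theorem pvXValues_eq (L : List String) :
    PySem.List.sorted (PySem.Set.ofList L) (fun s => s) true =
      pyUniq (PySem.List.sorted L (fun s => s) true) := by
  apply PySem.List.sorted_rev_eq_of_perm_of_pairwise_gt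
  · have hnd : (pyUniq (PySem.List.sorted L (fun s => s) true)).Nodup :=
      (pvUniq_pairwise _ (pvSorted_rev_pairwise L)).imp (fun h => ne_of_gt h)
    rw [List.perm_ext_iff_of_nodup hnd (PySem.Set.nodup_ofList L)]
    intro a
    rw [pvMem_pvUniq _ (pvSorted_rev_pairwise L), PySem.Set.mem_ofList,
      PySem.List.mem_sorted]
  · exact pvUniq_pairwise _ (pvSorted_rev_pairwise L)

theorem pvXVNodup (L : List String) :
    (pyUniq (PySem.List.sorted L (fun s => s) true)).Nodup :=
  (pvUniq_pairwise _ (pvSorted_rev_pairwise L)).imp (fun h => ne_of_gt h)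

-- ---- the chart dictionaries ----

def pvValA (d : List (String × Int)) (x : String) : Int :=
  if (PySem.Dict.ofList d).contains x then (PySem.Dict.ofList d).getD x 0 else 0

theorem pvValA_eq_getD (d : List (String × Int)) (x : String) :
    pvValA d x = (PySem.Dict.ofList d).getD x 0 := by
  unfold pvValA
  by_cases h : (PySem.Dict.ofList d).contains x
  · rw [if_pos h]
  · rw [if_neg h, PySem.Dict.getD_of_not_contains _ _ (by simpa using h)]

def pvFill (xV : List String) (d : List (String × Int)) : PySem.Dict String Int :=
  xV.foldl (fun inner x => inner.insert x (pvValA d x)) PySem.Dict.empty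

theorem pvMapId {α : Type} (f : α → α) (l : List α) (h : ∀ a ∈ l, f a = a) : l.map f = l :=
  (List.map_congr_left (g := id) h).trans (List.map_id l)

-- re-inserting the stored value is a no-op
theorem pvInsert_getD_self {κ ν : Type} [BEq κ] [LawfulBEq κ] (C : PySem.Dict κ ν) (k : κ)
    (dflt : ν) (hk : C.contains k = true) (hnd : C.keys.Nodup) :
    C.insert k (C.getD k dflt) = C := by
  apply PySem.Dict.ext
  rw [PySem.Dict.items_insert_of_contains _ _ hk]
  apply pvMapId
  intro p hp
  by_cases hpk : (p.1 == k) = true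
  · have hpk' : p.1 = k := by simpa using hpk
    have hmem : (k, p.2) ∈ C.items := by rw [← hpk']; exact hp
    have hv : C.getD k dflt = p.2 := PySem.Dict.getD_of_mem_items _ hmem hnd dflt
    rw [if_pos hpk, hv, ← hpk']
  · simp [hpk]

-- one input dict's inner fill loop collapses to a single insert
theorem pvInnerLoop (xV : List String) (k : String) (g : String → Int) :
    ∀ (C : PySem.Dict String (PySem.Dict String Int)),
      C.contains k = true → C.keys.Nodup →
      xV.foldl (fun C x => C.modify k PySem.Dict.empty (fun inner => inner.insert x (g x))) C =
        C.insert k (xV.foldl (fun inner x => inner.insert x (g x)) (C.getD k PySem.Dict.empty)) := by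
  induction xV with
  | nil =>
    intro C hk hnd
    simp only [List.foldl]
    exact (pvInsert_getD_self C k PySem.Dict.empty hk hnd).symm
  | cons x xV ih =>
    intro C hk hnd
    simp only [List.foldl]
    rw [PySem.Dict.modify.eq_1]
    rw [ih _ (PySem.Dict.contains_insert_self _ _ _)
      (PySem.Dict.nodup_keys_insert _ _ _ hnd)]
    rw [PySem.Dict.getD_insert_self, PySem.Dict.insert_insert_self]

-- filling distinct fresh keys lists them in order
theorem pvFillItems (g : String → Int) : ∀ (xV : List String) (acc : PySem.Dict String Int),
    xV.Nodup → (∀ x ∈ xV, acc.contains x = false) →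
    (xV.foldl (fun inner x => inner.insert x (g x)) acc).items =
      acc.items ++ xV.map (fun x => (x, g x)) := by
  intro xV
  induction xV with
  | nil => intro acc _ _; simp
  | cons x xV ih =>
    intro acc hnd hfresh
    simp only [List.foldl, List.map]
    rw [ih (acc.insert x (g x)) (List.nodup_cons.mp hnd).2 ?_]
    · rw [PySem.Dict.items_insert_of_not_contains _ _ (hfresh x (by simp))]
      simp
    · intro y hy
      rw [PySem.Dict.contains_insert]
      have hyx : (y == x) = false := by
        simp only [beq_eq_false_iff_ne, ne_eq]
        intro hc; subst hc; exact (List.nodup_cons.mp hnd).1 hy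
      rw [hyx]
      simpa using hfresh y (List.mem_cons_of_mem _ hy)

def pvPending (i : Int) (ds : List (List (String × Int))) :
    List (String × PySem.Dict String Int) :=
  (PySem.List.enumerate ds i).map (fun p => (pvLabel p.1, PySem.Dict.empty))

def pvFilled (xV : List String) (i : Int) (ds : List (List (String × Int))) :
    List (String × PySem.Dict String Int) :=
  (PySem.List.enumerate ds i).map (fun p => (pvLabel p.1, pvFill xV p.2))

theorem pvPending_cons (d : List (String × Int)) (ds : List (List (String × Int))) (k : Int) :
    pvPending k (d :: ds) = (pvLabel k, PySem.Dict.empty) :: pvPending (k + 1) ds := by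
  simp [pvPending, PySem.List.enumerate_cons]

theorem pvFilled_cons (xV : List String) (d : List (String × Int))
    (ds : List (List (String × Int))) (k : Int) :
    pvFilled xV k (d :: ds) = (pvLabel k, pvFill xV d) :: pvFilled xV (k + 1) ds := by
  simp [pvFilled, PySem.List.enumerate_cons]

theorem pvPending_mem : ∀ (ds : List (List (String × Int))) (k : Int)
    (p : String × PySem.Dict String Int), p ∈ pvPending k ds →
    ∃ j : Int, k ≤ j ∧ p = (pvLabel j, PySem.Dict.empty) := by
  intro ds
  induction ds with
  | nil => intro k p hp; simp [pvPending, PySem.List.enumerate_nil] at hp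
  | cons d ds ih =>
    intro k p hp
    rw [pvPending_cons, List.mem_cons] at hp
    rcases hp with rfl | hp
    · exact ⟨k, le_rfl, rfl⟩
    · obtain ⟨j, hj, rfl⟩ := ih (k + 1) p hp
      exact ⟨j, by omega, rfl⟩

theorem pvPendingKeysNodup : ∀ (ds : List (List (String × Int))) (k : Int), 0 ≤ k →
    ((pvPending k ds).map Prod.fst).Nodup := by
  intro ds
  induction ds with
  | nil => intro k _; simp [pvPending, PySem.List.enumerate_nil]
  | cons d ds ih =>
    intro k hk
    rw [pvPending_cons]
    simp only [List.map_cons, List.nodup_cons]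
    refine ⟨?_, ih (k + 1) (by omega)⟩
    intro hmem
    obtain ⟨p, hp, hfst⟩ := List.mem_map.mp hmem
    obtain ⟨j, hj, rfl⟩ := pvPending_mem ds (k + 1) p hp
    have : j = k := (pvLabel_inj (by omega) hk (by simpa using hfst))
    omega

-- loop 1: the creation loop appends one fresh empty dict per input dict
theorem pvLoop1 : ∀ (ds : List (List (String × Int))) (i : Int)
    (C : PySem.Dict String (PySem.Dict String Int)),
    0 ≤ i → (∀ j : Int, i ≤ j → C.contains (pvLabel j) = false) →
    (ds.foldl
        (fun (st : Int × PySem.Dict String (PySem.Dict String Int)) _ =>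
          (st.1 + 1, st.2.insert ("y" ++ PySem.Int.toStr st.1) PySem.Dict.empty))
        (i, C)).2.items = C.items ++ pvPending i ds := by
  intro ds
  induction ds with
  | nil => intro i C _ _; simp [pvPending, PySem.List.enumerate_nil]
  | cons d ds ih =>
    intro i C hi hfresh
    simp only [List.foldl]
    rw [ih (i + 1) _ (by omega) ?_]
    · rw [show ("y" ++ PySem.Int.toStr i) = pvLabel i from rfl,
        PySem.Dict.items_insert_of_not_contains _ _ (hfresh i le_rfl),
        pvPending_cons, List.append_assoc]
      rfl
    · intro j hj
      rw [show ("y" ++ PySem.Int.toStr i) = pvLabel i from rfl, PySem.Dict.contains_insert]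
      have h1 : (pvLabel j == pvLabel i) = false := by
        simp only [beq_eq_false_iff_ne, ne_eq]
        intro hc
        have := pvLabel_inj (by omega) (by omega) hc
        omega
      rw [h1]
      simpa using hfresh j (by omega)

-- loop 2: the fill loop replaces each pending empty dict in place
theorem pvLoop2 (xV : List String) : ∀ (ds : List (List (String × Int))) (i : Int)
    (C : PySem.Dict String (PySem.Dict String Int)) (P : List (String × PySem.Dict String Int)),
    0 ≤ i → C.keys.Nodup → C.items = P ++ pvPending i ds →
    (∀ p ∈ P, ∀ j : Int, i ≤ j → p.1 ≠ pvLabel j) →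
    (ds.foldl
        (fun (st : Int × PySem.Dict String (PySem.Dict String Int)) d =>
          (st.1 + 1,
           xV.foldl
             (fun C x =>
               C.modify ("y" ++ PySem.Int.toStr st.1) PySem.Dict.empty
                 (fun inner => inner.insert x
                   (if (PySem.Dict.ofList d).contains x then (PySem.Dict.ofList d).getD x 0 else 0)))
             st.2))
        (i, C)).2.items = P ++ pvFilled xV i ds := by
  intro ds
  induction ds with
  | nil =>
    intro i C P _ _ hitems _
    simpa [pvFilled, pvPending, PySem.List.enumerate_nil] using hitems
  | cons d ds ih =>
    intro i C P hi hnd hitems hP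
    simp only [List.foldl]
    have hmem : (pvLabel i, (PySem.Dict.empty : PySem.Dict String Int)) ∈ C.items := by
      rw [hitems, pvPending_cons]
      simp
    have hcont : C.contains (pvLabel i) = true := by
      rw [PySem.Dict.contains_iff_mem_keys]
      exact PySem.Dict.mem_keys_of_mem_items _ hmem
    have hgetD : C.getD (pvLabel i) PySem.Dict.empty = PySem.Dict.empty :=
      PySem.Dict.getD_of_mem_items _ hmem hnd _
    rw [show ("y" ++ PySem.Int.toStr i) = pvLabel i from rfl]
    rw [pvInnerLoop xV (pvLabel i) _ C hcont hnd, hgetD]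
    have hstep : C.insert (pvLabel i)
        (xV.foldl (fun inner x => inner.insert x
          (if (PySem.Dict.ofList d).contains x then (PySem.Dict.ofList d).getD x 0 else 0))
          PySem.Dict.empty) = C.insert (pvLabel i) (pvFill xV d) := rfl
    rw [hstep]
    rw [ih (i + 1) (C.insert (pvLabel i) (pvFill xV d)) (P ++ [(pvLabel i, pvFill xV d)])
      (by omega) (PySem.Dict.nodup_keys_insert _ _ _ hnd) ?_ ?_]
    · rw [pvFilled_cons, List.append_assoc]
      rfl
    · -- items after the in-place overwrite
      rw [PySem.Dict.items_insert_of_contains _ _ hcont, hitems, pvPending_cons,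
        List.map_append, List.map_cons]
      simp only [beq_self_eq_true, if_true]
      rw [pvMapId _ P ?_, pvMapId _ (pvPending (i + 1) ds) ?_]
      · rw [List.append_assoc]; rfl
      · intro p hp
        obtain ⟨j, hj, rfl⟩ := pvPending_mem ds (i + 1) p hp
        have : (pvLabel j == pvLabel i) = false := by
          simp only [beq_eq_false_iff_ne, ne_eq]
          intro hc
          have := pvLabel_inj (by omega) (by omega) hc
          omega
        simp [this]
      · intro p hp
        have : (p.1 == pvLabel i) = false := by
          simp only [beq_eq_false_iff_ne, ne_eq]
          exact hP p hp i le_rfl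
        simp [this]
    · intro p hp j hj
      rcases List.mem_append.mp hp with h | h
      · exact hP p h j (by omega)
      · simp only [List.mem_singleton] at h
        subst h
        intro hc
        have := pvLabel_inj (i := i) (j := j) (by omega) (by omega) hc
        omega

-- full equality of the two ports
theorem pvMain (dictList : List (List (String × Int))) :
    mergeDictionariesToChartData dictList = mergeDictionariesToChartData_alt dictList := by
  have hL : dictList.foldl (fun acc d => acc ++ (PySem.Dict.ofList d).keys) [] =
      dictList.flatMap (fun d => (PySem.Dict.ofList d).keys) := by
    simpa using PySem.List.foldl_append_eq_flatMap
      (fun d => (PySem.Dict.ofList d).keys) dictList []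
  have hxv : PySem.List.sorted
      (PySem.Set.ofList (dictList.flatMap (fun d => (PySem.Dict.ofList d).keys)))
      (fun s => s) true =
      pyUniq (PySem.List.sorted
        (dictList.foldl (fun acc d => acc ++ (PySem.Dict.ofList d).keys) [])
        (fun s => s) true) := by
    rw [hL]; exact pvXValues_eq _
  unfold mergeDictionariesToChartData mergeDictionariesToChartData_alt
  simp only []
  rw [hxv]
  set xV := pyUniq (PySem.List.sorted
      (dictList.foldl (fun acc d => acc ++ (PySem.Dict.ofList d).keys) [])
      (fun s => s) true) with hxVdef
  have hxVnd : xV.Nodup := pvXVNodup _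
  refine Prod.ext rfl ?_
  -- loop 1
  have hinit := pvLoop1 dictList 1 PySem.Dict.empty (by norm_num)
    (fun j _ => PySem.Dict.contains_empty _)
  set init := dictList.foldl
      (fun (st : Int × PySem.Dict String (PySem.Dict String Int)) _ =>
        (st.1 + 1, st.2.insert ("y" ++ PySem.Int.toStr st.1) PySem.Dict.empty))
      (1, PySem.Dict.empty) with hinitdef
  have hinit' : init.2.items = pvPending 1 dictList := by
    rw [hinit]; rfl
  have hndinit : init.2.keys.Nodup := by
    have hk : init.2.keys = init.2.items.map Prod.fst := rfl
    rw [hk, hinit']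
    exact pvPendingKeysNodup dictList 1 (by norm_num)
  -- loop 2
  have hfin := pvLoop2 xV dictList 1 init.2 [] (by norm_num) hndinit
    (by simpa using hinit') (by simp)
  simp only [List.nil_append] at hfin
  rw [hfin]
  -- map to the final output
  simp only [pvFilled, List.map_map]
  apply List.map_congr_left
  intro p _
  simp only [Function.comp]
  refine Prod.ext rfl ?_
  show (pvFill xV p.2).items = xV.map (fun x => (x, (PySem.Dict.ofList p.2).getD x 0))
  unfold pvFill
  rw [pvFillItems _ xV PySem.Dict.empty hxVnd (fun x _ => PySem.Dict.contains_empty _)]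
  rw [show (PySem.Dict.empty : PySem.Dict String Int).items = [] from rfl, List.nil_append]
  exact List.map_congr_left (fun x _ => by rw [pvValA_eq_getD])

-- ===== VERDICT (by name: the statement is the Claim_ definition above) =====
theorem mergeDictionariesToChartData_spec : Claim_equal_mergeDictionariesToChartData := by
  intro dictList _
  unfold Spec_mergeDictionariesToChartData
  exact pvMain dictList
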